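-- pv_equiv track=rewrite | github.com/SylwiaHaracz/pp1 | 05-Test1/p6.py | f
-- ===== SOURCE A (Python) =====
-- def f(number,even):
--     number = str(number)
--     result = 0
--     if even == True:
--         for i in number:
--             if i == '0' or i=='2' or i =='4' or i =='6' or i=='8':
--                 result = result + int(i)
--     if even == False:
--         for i in number:
--             if i == '1' or i=='3' or i =='5' or i =='7' or i=='9':
--                 result = result + int(i)
--     return result
-- ===== SOURCE B (Python) =====
-- def f(number, even):
--     counts = {}
--     for ch in str(number):
--         counts[ch] = counts.get(ch, 0) + 1
--     if even == True:
--         return sum(int(d) * counts.get(d, 0) for d in '02468')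
--     if even == False:
--         return sum(int(d) * counts.get(d, 0) for d in '13579')
--     return 0
-- ===== Notes on version B (the rewrite author's own statement) =====
-- stated objective: alternative
-- what changed: B builds a character-frequency dictionary of str(number) in one pass and then sums digit*count over the five relevant digit characters, instead of A's per-character filtered accumulation loop.
import Mathlib
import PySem

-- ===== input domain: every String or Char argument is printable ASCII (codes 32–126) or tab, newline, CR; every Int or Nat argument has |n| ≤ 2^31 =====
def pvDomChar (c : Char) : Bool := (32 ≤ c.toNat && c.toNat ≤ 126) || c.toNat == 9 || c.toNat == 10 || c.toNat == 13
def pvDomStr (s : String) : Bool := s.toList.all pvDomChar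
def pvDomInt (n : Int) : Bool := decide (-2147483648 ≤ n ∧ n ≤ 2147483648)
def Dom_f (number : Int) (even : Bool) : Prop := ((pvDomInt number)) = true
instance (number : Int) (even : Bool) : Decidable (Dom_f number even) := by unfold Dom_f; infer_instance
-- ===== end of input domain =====

-- B replaces A's filtered accumulation loop by a frequency dictionary plus a fixed 5-term digit*count sum (alternative decomposition, same cost).

-- ===== PORT A =====
def f (number : Int) (even : Bool) : Int :=
  let s := PySem.Int.toChars number
  let result : Int := 0
  let result :=
    if even == true then
      s.foldl (fun r i =>
        if i == '0' || i == '2' || i == '4' || i == '6' || i == '8' then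
          r + (PySem.Int.ofChars? [i]).getD 0
        else r) result
    else result
  if even == false then
    s.foldl (fun r i =>
      if i == '1' || i == '3' || i == '5' || i == '7' || i == '9' then
        r + (PySem.Int.ofChars? [i]).getD 0
      else r) result
  else result

-- ===== PORT B =====
def f_alt (number : Int) (even : Bool) : Int :=
  let counts : PySem.Dict Char Int :=
    (PySem.Int.toChars number).foldl (fun d ch => d.insert ch (d.getD ch 0 + 1)) PySem.Dict.empty
  if even == true then
    (['0', '2', '4', '6', '8'].map (fun d => (PySem.Int.ofChars? [d]).getD 0 * counts.getD d 0)).sum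
  else if even == false then
    (['1', '3', '5', '7', '9'].map (fun d => (PySem.Int.ofChars? [d]).getD 0 * counts.getD d 0)).sum
  else 0

-- ===== PRECONDITION & SPEC =====
def Spec_f (number : Int) (even : Bool) (out : Int) : Prop := out = f_alt number even
instance (number : Int) (even : Bool) (out : Int) : Decidable (Spec_f number even out) := by unfold Spec_f; infer_instance

-- ===== CLAIM (what is proved, stated in full; the proofs are below) =====
def Claim_equal_f : Prop := ∀ (number : Int) (even : Bool), Dom_f number even → Spec_f number even (f number even)

-- ===== LEMMAS AND PROOFS =====

lemma fold_even (cs : List Char) (a : Int) :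
    cs.foldl (fun r i =>
      if i == '0' || i == '2' || i == '4' || i == '6' || i == '8' then
        r + (PySem.Int.ofChars? [i]).getD 0
      else r) a
    = a + 2 * (cs.count '2' : Int) + 4 * (cs.count '4' : Int)
        + 6 * (cs.count '6' : Int) + 8 * (cs.count '8' : Int) := by
  induction cs generalizing a with
  | nil => simp
  | cons c cs ih =>
    rw [List.foldl_cons, ih]
    by_cases h0 : c = '0'
    · subst h0; rw [show (PySem.Int.ofChars? ['0']).getD 0 = (0:Int) from by decide]; simp
    · by_cases h2 : c = '2'
      · subst h2; rw [show (PySem.Int.ofChars? ['2']).getD 0 = (2:Int) from by decide]; simp; ring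
      · by_cases h4 : c = '4'
        · subst h4; rw [show (PySem.Int.ofChars? ['4']).getD 0 = (4:Int) from by decide]; simp; ring
        · by_cases h6 : c = '6'
          · subst h6; rw [show (PySem.Int.ofChars? ['6']).getD 0 = (6:Int) from by decide]; simp; ring
          · by_cases h8 : c = '8'
            · subst h8; rw [show (PySem.Int.ofChars? ['8']).getD 0 = (8:Int) from by decide]; simp; ring
            · simp [h0, h2, h4, h6, h8]

lemma fold_odd (cs : List Char) (a : Int) :
    cs.foldl (fun r i =>
      if i == '1' || i == '3' || i == '5' || i == '7' || i == '9' then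
        r + (PySem.Int.ofChars? [i]).getD 0
      else r) a
    = a + 1 * (cs.count '1' : Int) + 3 * (cs.count '3' : Int)
        + 5 * (cs.count '5' : Int) + 7 * (cs.count '7' : Int) + 9 * (cs.count '9' : Int) := by
  induction cs generalizing a with
  | nil => simp
  | cons c cs ih =>
    rw [List.foldl_cons, ih]
    by_cases h1 : c = '1'
    · subst h1; rw [show (PySem.Int.ofChars? ['1']).getD 0 = (1:Int) from by decide]; simp; ring
    · by_cases h3 : c = '3'
      · subst h3; rw [show (PySem.Int.ofChars? ['3']).getD 0 = (3:Int) from by decide]; simp; ring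
      · by_cases h5 : c = '5'
        · subst h5; rw [show (PySem.Int.ofChars? ['5']).getD 0 = (5:Int) from by decide]; simp; ring
        · by_cases h7 : c = '7'
          · subst h7; rw [show (PySem.Int.ofChars? ['7']).getD 0 = (7:Int) from by decide]; simp; ring
          · by_cases h9 : c = '9'
            · subst h9; rw [show (PySem.Int.ofChars? ['9']).getD 0 = (9:Int) from by decide]; simp; ring
            · simp [h1, h3, h5, h7, h9]

lemma f_alt_eval (number : Int) (even : Bool) :
    f_alt number even =
      if even then
        2 * ((PySem.Int.toChars number).count '2' : Int)
          + 4 * ((PySem.Int.toChars number).count '4' : Int)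
          + 6 * ((PySem.Int.toChars number).count '6' : Int)
          + 8 * ((PySem.Int.toChars number).count '8' : Int)
      else
        1 * ((PySem.Int.toChars number).count '1' : Int)
          + 3 * ((PySem.Int.toChars number).count '3' : Int)
          + 5 * ((PySem.Int.toChars number).count '5' : Int)
          + 7 * ((PySem.Int.toChars number).count '7' : Int)
          + 9 * ((PySem.Int.toChars number).count '9' : Int) := by
  cases even <;>
    simp [f_alt, PySem.Dict.getD_foldl_insert_add_one,
      show (PySem.Int.ofChars? ['0']).getD 0 = (0:Int) from by decide, show (PySem.Int.ofChars? ['2']).getD 0 = (2:Int) from by decide, show (PySem.Int.ofChars? ['4']).getD 0 = (4:Int) from by decide, show (PySem.Int.ofChars? ['6']).getD 0 = (6:Int) from by decide, show (PySem.Int.ofChars? ['8']).getD 0 = (8:Int) from by decide, show (PySem.Int.ofChars? ['1']).getD 0 = (1:Int) from by decide, show (PySem.Int.ofChars? ['3']).getD 0 = (3:Int) from by decide, show (PySem.Int.ofChars? ['5']).getD 0 = (5:Int) from by decide, show (PySem.Int.ofChars? ['7']).getD 0 = (7:Int) from by decide, show (PySem.Int.ofChars? ['9']).getD 0 = (9:Int)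 from by decide] <;> ring

-- ===== VERDICT (by name: the statement is the Claim_ definition above) =====
theorem f_spec : Claim_equal_f := by
  intro number even _
  unfold Spec_f
  rw [f_alt_eval]
  cases even
  · rw [show f number false = List.foldl (fun r i =>
        if i == '1' || i == '3' || i == '5' || i == '7' || i == '9' then
          r + (PySem.Int.ofChars? [i]).getD 0
        else r) 0 (PySem.Int.toChars number) from rfl, fold_odd]
    norm_num
  · rw [show f number true = List.foldl (fun r i =>
        if i == '0' || i == '2' || i == '4' || i == '6' || i == '8' then
          r + (PySem.Int.ofChars? [i]).getD 0
        else r) 0 (PySem.Int.toChars number) from rfl, fold_even]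
    norm_num
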